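-- pv_equiv track=rewrite | github.com/se-buw/smt-metrics | analysis/steps_to_fix.py | calculate_syntaxerror_fix_steps
-- ===== SOURCE A (Python) =====
-- def calculate_syntaxerror_fix_steps(status_chain) -> list:
--     """
--     Calculate the number of steps to fix the first occurrence of consecutive syntax errors.
--     Args:
--         status_chain (list): A list of status values (e.g., "ERROR", "SAT", "UNSAT").
--     Returns:
--         list: A list of steps to fix the first occurrence of consecutive syntax errors.
--     """
--     steps = []
--     i = 0
--     while i < len(status_chain):
--         if status_chain[i] == "ERROR":
--             # Record the first occurrence of consecutive PARSEERRORs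
--             start = i
--             while i + 1 < len(status_chain) and status_chain[i + 1] == "ERROR":
--                 i += 1
--             # Find the next non-PARSEERROR value
--             for j in range(i + 1, len(status_chain)):
--                 if status_chain[j] != "ERROR":
--                     steps.append(j - start)
--                     break
--         i += 1
--     return steps
-- ===== SOURCE B (Python) =====
-- def calculate_syntaxerror_fix_steps(status_chain) -> list:
--     n = len(status_chain)
--     # boundary detection: indices where an ERROR run starts / where a followed ERROR run ends
--     starts = [i for i in range(n)
--               if status_chain[i] == "ERROR" and (i == 0 or status_chain[i - 1] != "ERROR")]
--     ends = [i for i in range(n - 1)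
--             if status_chain[i] == "ERROR" and status_chain[i + 1] != "ERROR"]
--     # pair the k-th run start with the k-th followed run end; a trailing run has no end
--     return [e - s + 1 for s, e in zip(starts, ends)]
-- ===== Notes on version B (the rewrite author's own statement) =====
-- stated objective: alternative
-- what changed: Replaces A's stateful index walk (nested run-extension and lookahead scans with a moving cursor) by boundary detection: two comprehensions collect the indices where an ERROR run starts and where a followed ERROR run ends, and zip pairs the k-th start with the k-th end to yield e - s + 1; a trailing ERROR run has no end boundary and is dropped by zip's truncation.
import Mathlib
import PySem

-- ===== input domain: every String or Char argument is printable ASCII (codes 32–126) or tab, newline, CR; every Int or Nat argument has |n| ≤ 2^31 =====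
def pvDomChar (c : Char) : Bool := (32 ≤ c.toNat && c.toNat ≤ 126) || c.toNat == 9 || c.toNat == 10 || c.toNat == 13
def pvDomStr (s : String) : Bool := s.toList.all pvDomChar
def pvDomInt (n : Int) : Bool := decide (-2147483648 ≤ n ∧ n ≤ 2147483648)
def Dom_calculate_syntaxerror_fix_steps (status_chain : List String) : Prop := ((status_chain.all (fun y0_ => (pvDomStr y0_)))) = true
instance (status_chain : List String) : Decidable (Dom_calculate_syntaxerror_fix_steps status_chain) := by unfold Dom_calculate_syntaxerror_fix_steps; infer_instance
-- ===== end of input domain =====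

-- B replaces A's stateful index walk by boundary detection: collect the indices of ERROR-run
-- starts and of followed ERROR-run ends in two passes, then zip them pairwise. Objective: alternative.

-- ===== PORT A =====
-- The index loops are ported with a fuel parameter (always called with fuel = chain.length,
-- enough for every loop here) so the recursion is structural; fuel only makes the loop total.

-- inner 'while i + 1 < len and chain[i+1] == "ERROR": i += 1'
def pvRunEnd (chain : List String) : Nat → Nat → Nat
  | 0, i => i
  | fuel + 1, i =>
    if i + 1 < chain.length ∧ chain.getD (i + 1) "" = "ERROR" then pvRunEnd chain fuel (i + 1)
    else i

-- inner 'for j in range(i+1, len): if chain[j] != "ERROR": … break' — first index ≥ j holding a non-"ERROR"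
def pvFindNonErr (chain : List String) : Nat → Nat → Option Nat
  | 0, _ => none
  | fuel + 1, j =>
    if j < chain.length then
      if chain.getD j "" ≠ "ERROR" then some j else pvFindNonErr chain fuel (j + 1)
    else none

-- outer 'while i < len(status_chain)' with accumulator steps
def pvALoop (chain : List String) : Nat → Nat → List Int → List Int
  | 0, _, steps => steps
  | fuel + 1, i, steps =>
    if i < chain.length then
      if chain.getD i "" = "ERROR" then
        -- start = i; i advances to the run end (inner while), then the for-loop scans from there + 1
        match pvFindNonErr chain chain.length (pvRunEnd chain chain.length i + 1) with
        | some j => pvALoop chain fuel (pvRunEnd chain chain.length i + 1) (steps ++ [(j : Int) - (i : Int)])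
        | none => pvALoop chain fuel (pvRunEnd chain chain.length i + 1) steps
      else
        pvALoop chain fuel (i + 1) steps
    else steps

def calculate_syntaxerror_fix_steps (status_chain : List String) : List Int :=
  pvALoop status_chain status_chain.length 0 []

-- ===== PORT B =====
-- 'status_chain[i] == "ERROR" and (i == 0 or status_chain[i-1] != "ERROR")' (i always in range)
def pvStartPred (chain : List String) (i : Nat) : Bool :=
  (chain.getD i "" == "ERROR") && (i == 0 || !(chain.getD (i - 1) "" == "ERROR"))

-- 'status_chain[i] == "ERROR" and status_chain[i+1] != "ERROR"' (i, i+1 always in range)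
def pvEndPred (chain : List String) (i : Nat) : Bool :=
  (chain.getD i "" == "ERROR") && !(chain.getD (i + 1) "" == "ERROR")

def calculate_syntaxerror_fix_steps_alt (status_chain : List String) : List Int :=
  let starts := (List.range status_chain.length).filter (pvStartPred status_chain)
  let ends := (List.range (status_chain.length - 1)).filter (pvEndPred status_chain)
  (starts.zip ends).map (fun p => (p.2 : Int) - (p.1 : Int) + 1)

-- ===== PRECONDITION & SPEC =====
def Spec_calculate_syntaxerror_fix_steps (status_chain : List String) (out : List Int) : Prop := out = calculate_syntaxerror_fix_steps_alt status_chain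
instance (status_chain : List String) (out : List Int) : Decidable (Spec_calculate_syntaxerror_fix_steps status_chain out) := by unfold Spec_calculate_syntaxerror_fix_steps; infer_instance

-- ===== CLAIM (what is proved, stated in full; the proofs are below) =====
def Claim_equal_calculate_syntaxerror_fix_steps : Prop := ∀ (status_chain : List String), Dom_calculate_syntaxerror_fix_steps status_chain → Spec_calculate_syntaxerror_fix_steps status_chain (calculate_syntaxerror_fix_steps status_chain)

-- ===== LEMMAS AND PROOFS =====

-- common reference spec: for each maximal ERROR run followed by something, its length
def pvG : List String → List Int
  | [] => []
  | x :: xs =>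
    if x = "ERROR" then
      let k := (xs.takeWhile (· = "ERROR")).length
      let rest := xs.drop k
      (if rest = [] then [] else [(k : Int) + 1]) ++ pvG rest
    else pvG xs
termination_by l => l.length
decreasing_by
  all_goals simp

theorem pv_drop_takeWhile (p : String → Bool) (l : List String) :
    l.drop (l.takeWhile p).length = l.dropWhile p := by
  have h2 : l.drop (l.takeWhile p).length
      = (l.takeWhile p ++ l.dropWhile p).drop (l.takeWhile p).length := by
    rw [List.takeWhile_append_dropWhile]
  rw [h2, List.drop_left]

theorem pv_head_dropWhile (p : String → Bool) (y : String) (ys l : List String)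
    (h : l.dropWhile p = y :: ys) : p y = false := by
  have h0 : 0 < (l.dropWhile p).length := by rw [h]; simp
  have := List.dropWhile_get_zero_not p l h0
  simp [h] at this; simp [this]

-- recursive characterizations of the two boundary filters (indices relative to the list head)
def pvStartsR (prevErr : Bool) : List String → List Nat
  | [] => []
  | x :: xs =>
    (if x = "ERROR" ∧ prevErr = false then [0] else []) ++ (pvStartsR (x == "ERROR") xs).map (· + 1)

def pvEndsR : List String → List Nat
  | [] => []
  | [_] => []
  | x :: y :: r =>
    (if x = "ERROR" ∧ y ≠ "ERROR" then [0] else []) ++ (pvEndsR (y :: r)).map (· + 1)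

theorem pv_starts_filter_aux (xs : List String) (prev : String) :
    (List.range xs.length).filter
        (fun j => (xs.getD j "" == "ERROR") && !((prev :: xs).getD j "" == "ERROR"))
      = pvStartsR (prev == "ERROR") xs := by
  induction xs generalizing prev with
  | nil => simp [pvStartsR]
  | cons x xs ih =>
    rw [List.length_cons, List.range_succ_eq_map, List.filter_cons, List.filter_map]
    have hcomp : (fun j => ((x :: xs).getD j "" == "ERROR")
          && !((prev :: x :: xs).getD j "" == "ERROR")) ∘ Nat.succ
        = fun j => (xs.getD j "" == "ERROR") && !((x :: xs).getD j "" == "ERROR") := by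
      funext j; simp
    rw [hcomp, ih x, pvStartsR]
    by_cases hx : x = "ERROR" <;> by_cases hp : prev = "ERROR" <;>
      simp [hx, hp]

theorem pv_starts_filter (chain : List String) :
    (List.range chain.length).filter (pvStartPred chain) = pvStartsR false chain := by
  have hfalse : ("" == "ERROR") = false := by decide
  have h : ∀ j, pvStartPred chain j
      = ((chain.getD j "" == "ERROR") && !(("" :: chain).getD j "" == "ERROR")) := by
    intro j
    cases j with
    | zero => simp [pvStartPred]
    | succ j => simp [pvStartPred]
  calc (List.range chain.length).filter (pvStartPred chain)
      = (List.range chain.length).filter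
          (fun j => (chain.getD j "" == "ERROR") && !(("" :: chain).getD j "" == "ERROR")) := by
        apply List.filter_congr; intro i _; exact h i
    _ = pvStartsR ("" == "ERROR") chain := pv_starts_filter_aux chain ""
    _ = pvStartsR false chain := by rw [hfalse]

theorem pv_ends_filter (chain : List String) :
    (List.range (chain.length - 1)).filter (pvEndPred chain) = pvEndsR chain := by
  match chain with
  | [] => simp [pvEndsR]
  | [x] => simp [pvEndsR]
  | x :: y :: r =>
    have ih := pv_ends_filter (y :: r)
    have hlen : (x :: y :: r).length - 1 = r.length + 1 := by simp
    rw [hlen, List.range_succ_eq_map, List.filter_cons, List.filter_map]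
    have hcomp : (pvEndPred (x :: y :: r)) ∘ Nat.succ = pvEndPred (y :: r) := by
      funext j; simp [pvEndPred]
    have hlen2 : (y :: r).length - 1 = r.length := by simp
    rw [hlen2] at ih
    rw [hcomp, ih, pvEndsR]
    by_cases hxe : x = "ERROR"
    · subst hxe
      by_cases hy : y = "ERROR"
      · subst hy
        have h0 : pvEndPred ("ERROR" :: "ERROR" :: r) 0 = false := by simp [pvEndPred]
        simp [h0]
      · have h0 : pvEndPred ("ERROR" :: y :: r) 0 = true := by simp [pvEndPred, hy]
        simp [h0, hy]
    · have h0 : pvEndPred (x :: y :: r) 0 = false := by simp [pvEndPred, hxe]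
      simp [h0, hxe]
  termination_by chain.length

-- within a run of "ERROR"s, no further start boundary; indices after the run shift by its length
theorem pv_startsR_run (t rest : List String) (ht : ∀ y ∈ t, y = "ERROR") :
    pvStartsR true (t ++ rest) = (pvStartsR true rest).map (· + t.length) := by
  induction t with
  | nil => simp
  | cons e t ih =>
    have he : e = "ERROR" := ht e (by simp)
    subst he
    rw [List.cons_append, pvStartsR]
    simp only [show ("ERROR" == "ERROR") = true from by decide]
    rw [ih (fun y hy => ht y (by simp [hy]))]
    simp only [List.length_cons, List.map_map]
    have : ((· + 1) ∘ (· + t.length) : Nat → Nat) = (· + (t.length + 1)) := by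
      funext a; simp [Function.comp]; omega
    simp [this]

-- the prev-state only matters when the head is "ERROR"
theorem pv_startsR_prev (rest : List String)
    (h : ∀ z zs, rest = z :: zs → z ≠ "ERROR") :
    pvStartsR true rest = pvStartsR false rest := by
  cases rest with
  | nil => rfl
  | cons z zs =>
    have hz : z ≠ "ERROR" := h z zs rfl
    rw [pvStartsR, pvStartsR]
    simp [hz]

-- end boundaries of '"ERROR" :: (all-ERROR t)': a trailing run has no end
theorem pv_endsR_run_nil (t : List String) (ht : ∀ y ∈ t, y = "ERROR") :
    pvEndsR ("ERROR" :: t) = [] := by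
  induction t with
  | nil => rfl
  | cons e t ih =>
    have he : e = "ERROR" := ht e (by simp)
    subst he
    rw [pvEndsR]
    rw [ih (fun y hy => ht y (by simp [hy]))]
    simp

-- end boundaries of '"ERROR" :: (all-ERROR t ++ z :: zs)' with z non-ERROR
theorem pv_endsR_run_cons (t : List String) (z : String) (zs : List String)
    (ht : ∀ y ∈ t, y = "ERROR") (hz : z ≠ "ERROR") :
    pvEndsR ("ERROR" :: (t ++ z :: zs))
      = t.length :: (pvEndsR (z :: zs)).map (· + (t.length + 1)) := by
  induction t with
  | nil =>
    rw [List.nil_append, pvEndsR]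
    simp [hz]
  | cons e t ih =>
    have he : e = "ERROR" := ht e (by simp)
    subst he
    rw [List.cons_append, pvEndsR]
    rw [ih (fun y hy => ht y (by simp [hy]))]
    simp only [List.length_cons, List.map_map, List.map_cons]
    have : ((· + 1) ∘ (· + (t.length + 1)) : Nat → Nat) = (· + (t.length + 1 + 1)) := by
      funext a; simp [Function.comp]; omega
    simp [this]

-- the zipped boundary pairs compute exactly pvG
theorem pv_zip_eq_pvG (l : List String) :
    ((pvStartsR false l).zip (pvEndsR l)).map (fun p => (p.2 : Int) - (p.1 : Int) + 1)
      = pvG l := by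
  match h : l with
  | [] => simp [pvStartsR, pvEndsR, pvG]
  | x :: xs =>
    by_cases hx : x = "ERROR"
    · subst hx
      obtain ⟨T, R, hT, hR⟩ : ∃ T R, T = xs.takeWhile (· = "ERROR")
          ∧ R = xs.dropWhile (· = "ERROR") := ⟨_, _, rfl, rfl⟩
      have hsplit : T ++ R = xs := by
        rw [hT, hR]; exact List.takeWhile_append_dropWhile
      have ht : ∀ y ∈ T, y = "ERROR" := by
        intro y hy; rw [hT] at hy; simpa using List.mem_takeWhile_imp hy
      have hRhead : ∀ z zs, R = z :: zs → z ≠ "ERROR" := by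
        intro z zs hzz
        have := pv_head_dropWhile (· = "ERROR") z zs xs (by rw [← hR, hzz])
        simpa using this
      have hlenR : R.length ≤ xs.length := by
        rw [hR]; exact List.length_dropWhile_le _ _
      have ih := pv_zip_eq_pvG R
      have hstarts : pvStartsR false ("ERROR" :: xs)
          = 0 :: ((pvStartsR false R).map (· + T.length)).map (· + 1) := by
        rw [pvStartsR]
        simp only [show ("ERROR" == "ERROR") = true from by decide]
        rw [← hsplit, pv_startsR_run T R ht, pv_startsR_prev R hRhead]
        simp
      have hdrop : xs.drop T.length = R := by
        rw [hT, pv_drop_takeWhile, ← hR]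
      have hpvg : pvG ("ERROR" :: xs)
          = (if R = [] then [] else [(T.length : Int) + 1]) ++ pvG R := by
        rw [pvG, if_pos rfl]
        simp only [← hT, hdrop]
      cases hr : R with
      | nil =>
        have hxsE : ∀ y ∈ xs, y = "ERROR" := by
          intro y hy
          rw [← hsplit, hr] at hy
          exact ht y (by simpa using hy)
        have hends := pv_endsR_run_nil xs hxsE
        rw [hstarts, hends, hpvg, hr]
        simp [pvG]
      | cons z zs =>
        have hz : z ≠ "ERROR" := hRhead z zs hr
        have hends : pvEndsR ("ERROR" :: xs)
            = T.length :: (pvEndsR R).map (· + (T.length + 1)) := by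
          conv_lhs => rw [← hsplit, hr]
          rw [pv_endsR_run_cons T z zs ht hz, ← hr]
        rw [hstarts, hends, List.zip_cons_cons, List.map_cons]
        have hzip : ((pvStartsR false R).map (· + T.length)).map (· + 1)
            = (pvStartsR false R).map (· + (T.length + 1)) := by
          rw [List.map_map]; apply List.map_congr_left; intro a _
          show a + T.length + 1 = a + (T.length + 1)
          omega
        rw [hzip, List.zip_map, List.map_map]
        have hfn : ((fun p => ((p : Nat × Nat).2 : Int) - (p.1 : Int) + 1)
              ∘ Prod.map (· + (T.length + 1)) (· + (T.length + 1)))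
            = fun p => ((p : Nat × Nat).2 : Int) - (p.1 : Int) + 1 := by
          funext p
          show ((p.2 + (T.length + 1) : Nat) : Int) - ((p.1 + (T.length + 1) : Nat) : Int) + 1
            = (p.2 : Int) - (p.1 : Int) + 1
          push_cast; ring
        rw [hfn, ih, hpvg, if_neg (by simp [hr])]
        norm_num
    · have hx0 : (x == "ERROR") = false := by simp [hx]
      have hstarts : pvStartsR false (x :: xs) = (pvStartsR false xs).map (· + 1) := by
        rw [pvStartsR, hx0]; simp [hx]
      have hpvg : pvG (x :: xs) = pvG xs := by rw [pvG, if_neg hx]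
      have ih := pv_zip_eq_pvG xs
      cases hxs : xs with
      | nil => simp [pvStartsR, pvEndsR, pvG, hx]
      | cons y r =>
        rw [hxs] at hstarts hpvg ih
        have hends : pvEndsR (x :: y :: r) = (pvEndsR (y :: r)).map (· + 1) := by
          rw [pvEndsR]; simp [hx]
        rw [hstarts, hends, List.zip_map, List.map_map]
        have hfn : ((fun p => ((p : Nat × Nat).2 : Int) - (p.1 : Int) + 1)
              ∘ Prod.map (· + 1) (· + 1))
            = fun p => ((p : Nat × Nat).2 : Int) - (p.1 : Int) + 1 := by
          funext p
          show ((p.2 + 1 : Nat) : Int) - ((p.1 + 1 : Nat) : Int) + 1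
            = (p.2 : Int) - (p.1 : Int) + 1
          push_cast; ring
        rw [hfn, ih, hpvg]
  termination_by l.length
  decreasing_by all_goals (simp_all; try omega)

theorem pv_alt_eq_pvG (l : List String) :
    calculate_syntaxerror_fix_steps_alt l = pvG l := by
  rw [calculate_syntaxerror_fix_steps_alt]
  simp only [pv_starts_filter, pv_ends_filter]
  exact pv_zip_eq_pvG l

theorem pv_getD_lt (l : List String) (i : Nat) (h : i < l.length) :
    l.getD i "" = l[i] := by
  simp [List.getD_eq_getElem?_getD, List.getElem?_eq_getElem h]

theorem pvRunEnd_eq (chain : List String) (fuel i : Nat)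
    (hfuel : chain.length - (i + 1) ≤ fuel) :
    pvRunEnd chain fuel i = i + ((chain.drop (i + 1)).takeWhile (· = "ERROR")).length := by
  induction fuel generalizing i with
  | zero =>
    have : chain.drop (i + 1) = [] := by
      rw [List.drop_eq_nil_iff]; omega
    rw [pvRunEnd, this]; simp
  | succ fuel ih =>
    rw [pvRunEnd]
    by_cases h : i + 1 < chain.length ∧ chain.getD (i + 1) "" = "ERROR"
    · rw [if_pos h]
      obtain ⟨h1, h2⟩ := h
      have hrec := ih (i + 1) (by omega)
      have hd : chain.drop (i + 1) = chain[i + 1] :: chain.drop (i + 1 + 1) :=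
        List.drop_eq_getElem_cons h1
      rw [pv_getD_lt chain (i + 1) h1] at h2
      rw [hd, List.takeWhile_cons, if_pos (by simp [h2])]
      simp only [List.length_cons]
      omega
    · rw [if_neg h]
      by_cases h1 : i + 1 < chain.length
      · have h2 : ¬ chain.getD (i + 1) "" = "ERROR" := fun hc => h ⟨h1, hc⟩
        rw [pv_getD_lt chain (i + 1) h1] at h2
        have hd : chain.drop (i + 1) = chain[i + 1] :: chain.drop (i + 1 + 1) :=
          List.drop_eq_getElem_cons h1
        rw [hd, List.takeWhile_cons, if_neg (by simp [h2])]
        simp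
      · have : chain.drop (i + 1) = [] := by
          rw [List.drop_eq_nil_iff]; omega
        rw [this]; simp

theorem pvFindNonErr_at (chain : List String) (fuel j : Nat)
    (hfuel : chain.length - j ≤ fuel)
    (hj : chain.drop j = (chain.drop j).dropWhile (· = "ERROR")) :
    pvFindNonErr chain fuel j = if chain.drop j = [] then none else some j := by
  cases fuel with
  | zero =>
    have : chain.drop j = [] := by
      rw [List.drop_eq_nil_iff]; omega
    rw [pvFindNonErr, this]; simp
  | succ fuel =>
    rw [pvFindNonErr]
    by_cases h : j < chain.length
    · have hd : chain.drop j = chain[j] :: chain.drop (j + 1) := List.drop_eq_getElem_cons h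
      have hne : ¬ (chain[j] = "ERROR") := by
        have := pv_head_dropWhile (· = "ERROR") chain[j] (chain.drop (j + 1)) (chain.drop j)
          (by rw [← hj, hd])
        simpa using this
      have hcond : chain.getD j "" ≠ "ERROR" := by
        rw [pv_getD_lt chain j h]; exact hne
      rw [if_pos h, if_pos hcond, hd]
      simp
      exact h
    · rw [if_neg h, if_pos (by rw [List.drop_eq_nil_iff]; omega)]

theorem pvALoop_eq (chain : List String) (fuel i : Nat) (steps : List Int)
    (hfuel : chain.length - i ≤ fuel) :
    pvALoop chain fuel i steps = steps ++ pvG (chain.drop i) := by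
  induction fuel generalizing i steps with
  | zero =>
    have : chain.drop i = [] := by
      rw [List.drop_eq_nil_iff]; omega
    rw [pvALoop, this]; simp [pvG]
  | succ fuel ih =>
    rw [pvALoop]
    by_cases h : i < chain.length
    · have hd : chain.drop i = chain[i] :: chain.drop (i + 1) := List.drop_eq_getElem_cons h
      rw [if_pos h]
      by_cases hc : chain[i] = "ERROR"
      · rw [if_pos (by rw [pv_getD_lt chain i h]; exact hc)]
        have hrun := pvRunEnd_eq chain chain.length i (by omega)
        set k := ((chain.drop (i + 1)).takeWhile (· = "ERROR")).length with hk
        have hdd : (chain.drop (i + 1)).drop k = chain.drop (i + k + 1) := by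
          rw [List.drop_drop]; congr 1; omega
        have hdropk : chain.drop (i + k + 1) = (chain.drop (i + 1)).dropWhile (· = "ERROR") := by
          rw [← hdd, hk, pv_drop_takeWhile]
        have hfix : (chain.drop (i + k + 1)).dropWhile (· = "ERROR") = chain.drop (i + k + 1) := by
          rw [hdropk, List.dropWhile_idempotent]
        have hfind := pvFindNonErr_at chain chain.length (i + k + 1) (by omega) hfix.symm
        have hGside : pvG (chain.drop i)
            = (if chain.drop (i + k + 1) = [] then [] else [(k : Int) + 1]) ++ pvG (chain.drop (i + k + 1)) := by
          rw [hd, pvG, if_pos hc]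
          simp only [← hk, hdd]
        rw [hrun]
        by_cases hr : chain.drop (i + k + 1) = []
        · rw [if_pos hr] at hfind
          rw [hfind]
          rw [ih (i + k + 1) steps (by omega), hGside, if_pos hr, hr]
          simp [pvG]
        · rw [if_neg hr] at hfind
          rw [hfind]
          show pvALoop chain fuel (i + k + 1) (steps ++ [((i + k + 1 : Nat) : Int) - ((i : Nat) : Int)])
            = steps ++ pvG (chain.drop i)
          rw [ih (i + k + 1) _ (by omega), hGside, if_neg hr]
          have hcast : ((i + k + 1 : Nat) : Int) - ((i : Nat) : Int) = (k : Int) + 1 := by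
            push_cast; ring
          rw [hcast, List.append_assoc]
      · rw [if_neg (by rw [pv_getD_lt chain i h]; exact hc)]
        rw [ih (i + 1) steps (by omega), hd, pvG, if_neg hc]
    · rw [if_neg h]
      have : chain.drop i = [] := by rw [List.drop_eq_nil_iff]; omega
      rw [this]; simp [pvG]

-- ===== VERDICT (by name: the statement is the Claim_ definition above) =====
theorem calculate_syntaxerror_fix_steps_spec : Claim_equal_calculate_syntaxerror_fix_steps := by
  intro chain _
  show calculate_syntaxerror_fix_steps chain = calculate_syntaxerror_fix_steps_alt chain
  rw [calculate_syntaxerror_fix_steps, pvALoop_eq chain chain.length 0 [] (by omega),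
    pv_alt_eq_pvG]
  simp
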